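-- pv_equiv track=rewrite | github.com/killerloop85/ios-routing | scripts/update_routing_lists.py | compact_domains
-- ===== SOURCE A (Python) =====
-- from typing import Dict, Iterable, List, Sequence, Set
--
-- def compact_domains(domains: Iterable[str], always_keep: Set[str] | None = None) -> List[str]:
--     always_keep = always_keep or set()
--     ordered = sorted(set(domains), key=lambda item: (item.count("."), item))
--     selected: List[str] = []
--     for domain in ordered:
--         if domain in always_keep:
--             selected.append(domain)
--             continue
--         if any(domain == keep or domain.endswith("." + keep) for keep in selected):
--             continue
--         selected.append(domain)
--     return sorted(set(selected), key=lambda item: (item.count("."), item))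
-- ===== SOURCE B (Python) =====
-- from typing import Iterable, List, Set
--
--
-- def compact_domains(domains: Iterable[str], always_keep: Set[str] | None = None) -> List[str]:
--     always_keep = always_keep or set()
--     ordered = sorted(set(domains), key=lambda item: (item.count("."), item))
--     selected: List[str] = []
--     chosen: Set[str] = set()
--     for domain in ordered:
--         if domain not in always_keep and any(
--                 ch == "." and domain[i + 1:] in chosen
--                 for i, ch in enumerate(domain)):
--             continue
--         selected.append(domain)
--         chosen.add(domain)
--     return selected
-- ===== Notes on version B (the rewrite author's own statement) =====
-- stated objective: faster
-- what changed: The inner any-scan over all previously selected parents (one endswith per pair) is replaced by a hash set of chosen domains probed once per ancestor suffix of the current domain, and the final re-sort of the already-sorted selection is dropped.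
import Mathlib
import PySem

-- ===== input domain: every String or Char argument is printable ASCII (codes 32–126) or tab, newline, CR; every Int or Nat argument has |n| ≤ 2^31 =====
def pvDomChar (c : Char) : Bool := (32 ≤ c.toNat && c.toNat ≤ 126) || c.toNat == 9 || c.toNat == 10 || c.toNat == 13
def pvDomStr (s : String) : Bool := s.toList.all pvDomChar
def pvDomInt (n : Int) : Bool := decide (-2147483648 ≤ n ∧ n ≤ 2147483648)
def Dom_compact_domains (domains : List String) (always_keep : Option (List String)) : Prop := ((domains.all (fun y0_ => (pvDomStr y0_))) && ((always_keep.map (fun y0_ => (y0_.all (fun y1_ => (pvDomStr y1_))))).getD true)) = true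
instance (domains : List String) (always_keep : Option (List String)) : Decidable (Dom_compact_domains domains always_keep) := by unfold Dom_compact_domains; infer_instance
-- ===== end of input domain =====

-- B replaces A's inner scan over all previously selected parents (endswith against each one) by a
-- set of chosen domains probed once per ancestor suffix of the current domain, and drops A's final
-- re-sort, which is proved to be the identity on the already-sorted selection.

-- ===== PORT A =====
-- A's loop body ('"." + keep' is ported at the character level as '.' :: keep.toList — exact for Python string concatenation)
def pvStepA (ak : List String) (sel : List String) (domain : String) : List String :=
  if ak.contains domain then sel ++ [domain]
  else if sel.any (fun keep => domain == keep ||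
          PySem.Chars.endswith domain.toList ('.' :: keep.toList)) then sel
  else sel ++ [domain]

def compact_domains (domains : List String) (always_keep : Option (List String)) : List String :=
  let ak : List String := always_keep.getD []
  let ordered := PySem.List.sorted2 (PySem.Set.ofList domains)
      (fun item => (PySem.Str.count item "." : Int)) (fun item => item)
  let selected := ordered.foldl (pvStepA ak) []
  PySem.List.sorted2 (PySem.Set.ofList selected)
      (fun item => (PySem.Str.count item "." : Int)) (fun item => item)

-- ===== PORT B =====
-- B's loop body: state is (selected list, chosen set); 'domain[i+1:]' is PySem.Str.slice
def pvStepB (ak : List String) (st : List String × PySem.Set String) (domain : String) :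
    List String × PySem.Set String :=
  if !ak.contains domain && (PySem.List.enumerate domain.toList).any
        (fun p => p.2 == '.' &&
          PySem.Set.contains st.2 (PySem.Str.slice domain (some (p.1 + 1)))) then st
  else (st.1 ++ [domain], PySem.Set.add st.2 domain)

def compact_domains_alt (domains : List String) (always_keep : Option (List String)) : List String :=
  let ak : List String := always_keep.getD []
  let ordered := PySem.List.sorted2 (PySem.Set.ofList domains)
      (fun item => (PySem.Str.count item "." : Int)) (fun item => item)
  (ordered.foldl (pvStepB ak) (([] : List String), (PySem.Set.empty : PySem.Set String))).1

-- ===== PRECONDITION & SPEC =====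
def Spec_compact_domains (domains : List String) (always_keep : Option (List String)) (out : List String) : Prop := out = compact_domains_alt domains always_keep
instance (domains : List String) (always_keep : Option (List String)) (out : List String) : Decidable (Spec_compact_domains domains always_keep out) := by unfold Spec_compact_domains; infer_instance

-- ===== CLAIM (what is proved, stated in full; the proofs are below) =====
def Claim_equal_compact_domains : Prop := ∀ (domains : List String) (always_keep : Option (List String)), Dom_compact_domains domains always_keep → Spec_compact_domains domains always_keep (compact_domains domains always_keep)

-- ===== LEMMAS AND PROOFS =====

-- sorted2 with an (Int, String) tuple key is sorted with the lexicographic key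
lemma pv_sorted2_eq_sorted_lex {α : Type} (xs : List α) (k1 : α → Int) (k2 : α → String) :
    PySem.List.sorted2 xs k1 k2 =
      PySem.List.sorted xs (fun a => (toLex (k1 a, k2 a) : Lex (Int × String))) := by
  unfold PySem.List.sorted2 PySem.List.sorted
  have hb : ∀ a b : α,
      (decide (k1 a < k1 b) || (!decide (k1 b < k1 a) && decide (k2 a < k2 b))) =
        decide ((toLex (k1 a, k2 a) : Lex (Int × String)) < toLex (k1 b, k2 b)) := by
    intro a b
    rcases lt_trichotomy (k1 a) (k1 b) with h | h | h
    · simp only [Prod.Lex.lt_iff]; simp [h, asymm h]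
    · simp only [Prod.Lex.lt_iff]; simp [h]
    · simp only [Prod.Lex.lt_iff]; simp [h, asymm h, h.ne']
  simp only [hb]

-- a string ends with '.' ++ ks iff some '.' at index i is followed exactly by ks
lemma pv_endswith_dot_iff (cs ks : List Char) :
    PySem.Chars.endswith cs ('.' :: ks) = true ↔
      ∃ i : Nat, ∃ h : i < cs.length, cs[i] = '.' ∧ cs.drop (i + 1) = ks := by
  rw [PySem.Chars.endswith_iff]
  constructor
  · rintro ⟨t, rfl⟩
    refine ⟨t.length, by simp, by simp, ?_⟩
    rw [show t.length + 1 = (t ++ ['.']).length by simp,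
      show t ++ '.' :: ks = (t ++ ['.']) ++ ks by simp, List.drop_left]
  · rintro ⟨i, h, hdot, hdrop⟩
    refine ⟨cs.take i, ?_⟩
    conv_rhs => rw [← List.take_append_drop i cs]
    rw [List.drop_eq_getElem_cons h, hdot, hdrop]

-- A's covering test over the selected list equals B's ancestor-suffix test against the chosen set
lemma pv_cond_eq (d : String) (sel : List String) (hd : d ∉ sel) :
    sel.any (fun keep => d == keep ||
        PySem.Chars.endswith d.toList ('.' :: keep.toList)) =
      (PySem.List.enumerate d.toList).any (fun p => p.2 == '.' &&
        PySem.Set.contains sel (PySem.Str.slice d (some (p.1 + 1)))) := by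
  rw [Bool.eq_iff_iff]
  simp only [List.any_eq_true, Bool.or_eq_true, Bool.and_eq_true, beq_iff_eq,
    PySem.Set.contains_iff, PySem.List.mem_enumerate_iff]
  constructor
  · rintro ⟨keep, hmem, hcase⟩
    rcases hcase with rfl | hend
    · exact absurd hmem hd
    · obtain ⟨i, hi, hdot, hdrop⟩ := (pv_endswith_dot_iff _ _).mp hend
      refine ⟨((0 : Int) + i, d.toList[i]), ⟨i, hi, rfl⟩, hdot, ?_⟩
      have hs : PySem.Str.slice d (some ((0 : Int) + i + 1)) = keep := by
        have ht : (PySem.Str.slice d (some ((0 : Int) + i + 1))).toList = keep.toList := by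
          rw [PySem.Str.toList_slice, PySem.Chars.slice_eq_listSlice]
          rw [show (0 : Int) + i + 1 = ((i + 1 : Nat) : Int) by push_cast; ring]
          rw [PySem.List.slice_from _ (by positivity)]
          simpa using hdrop
        exact String.ext (by simpa [String.ext_iff] using ht)
      rw [hs]; exact hmem
  · rintro ⟨p, ⟨k, hk, rfl⟩, hdot, hmem⟩
    refine ⟨PySem.Str.slice d (some ((0 : Int) + k + 1)), hmem, Or.inr ?_⟩
    apply (pv_endswith_dot_iff _ _).mpr
    refine ⟨k, hk, hdot, ?_⟩
    have ht : (PySem.Str.slice d (some ((0 : Int) + k + 1))).toList = d.toList.drop (k + 1) := by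
      rw [PySem.Str.toList_slice, PySem.Chars.slice_eq_listSlice]
      rw [show (0 : Int) + k + 1 = ((k + 1 : Nat) : Int) by push_cast; ring]
      rw [PySem.List.slice_from _ (by positivity)]
      simp
    rw [ht]

-- the two loops walk in lock-step: B's state is (A's list, A's list)
lemma pv_loop_eq (ak : List String) :
    ∀ (l sel : List String), (sel ++ l).Nodup →
      l.foldl (pvStepB ak) (sel, sel) = (l.foldl (pvStepA ak) sel, l.foldl (pvStepA ak) sel) := by
  intro l
  induction l with
  | nil => intro sel _; simp
  | cons d rest ih =>
    intro sel hnd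
    have hd : d ∉ sel := by
      have hnd' := hnd
      rw [List.nodup_append] at hnd'
      exact fun h => hnd'.2.2 d h d (by simp) rfl
    have hstep : pvStepB ak (sel, sel) d = (pvStepA ak sel d, pvStepA ak sel d) := by
      unfold pvStepA pvStepB
      rw [← pv_cond_eq d sel hd]
      by_cases hak : ak.contains d <;> by_cases hc : sel.any (fun keep => d == keep ||
          PySem.Chars.endswith d.toList ('.' :: keep.toList)) <;>
        simp [hc, PySem.Set.add_of_not_mem hd] <;> split_ifs <;> rfl
    have hsel' : pvStepA ak sel d = sel ∨ pvStepA ak sel d = sel ++ [d] := by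
      unfold pvStepA; split_ifs <;> simp
    simp only [List.foldl_cons, hstep]
    apply ih
    rcases hsel' with h | h <;> rw [h]
    · exact hnd.sublist ((List.sublist_cons_self d rest).append_left sel)
    · rw [List.append_assoc]
      simpa using hnd

-- A's fold result is a sublist of sel ++ input
lemma pv_foldA_sublist (ak : List String) :
    ∀ (l sel : List String), (l.foldl (pvStepA ak) sel).Sublist (sel ++ l) := by
  intro l
  induction l with
  | nil => intro sel; simp
  | cons d rest ih =>
    intro sel
    have hsel' : pvStepA ak sel d = sel ∨ pvStepA ak sel d = sel ++ [d] := by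
      unfold pvStepA; split_ifs <;> simp
    simp only [List.foldl_cons]
    rcases hsel' with h | h <;> rw [h]
    · exact (ih sel).trans (by simpa using ((List.sublist_cons_self d rest).append_left sel))
    · exact (ih (sel ++ [d])).trans (by simp [List.append_assoc])

-- ===== VERDICT (by name: the statement is the Claim_ definition above) =====
theorem compact_domains_spec : Claim_equal_compact_domains := by
  intro domains always_keep _
  unfold Spec_compact_domains compact_domains compact_domains_alt
  simp only [pv_sorted2_eq_sorted_lex]
  set ak := always_keep.getD [] with hak
  set key : String → Lex (Int × String) :=
    fun a => toLex ((PySem.Str.count a "." : Int), a) with hkey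
  set ordered := PySem.List.sorted (PySem.Set.ofList domains) key with hord
  have hnd : ordered.Nodup :=
    ((PySem.List.sorted_perm _ _ _).nodup_iff).mpr (PySem.Set.nodup_ofList domains)
  have hpw : ordered.Pairwise (fun a b => key a < key b) := by
    have h1 : ordered.Pairwise (fun a b => key a ≤ key b) := PySem.List.sorted_pairwise _ _
    refine (h1.and hnd).imp ?_
    rintro a b ⟨hle, hne⟩
    refine lt_of_le_of_ne hle (fun h => hne ?_)
    exact congrArg (fun x => (ofLex x).2) h
  have hempty : (PySem.Set.empty : PySem.Set String) = ([] : List String) := rfl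
  rw [hempty, pv_loop_eq ak ordered [] (by simpa using hnd)]
  set selA := ordered.foldl (pvStepA ak) [] with hselA
  have hsub : selA.Sublist ordered := by simpa using pv_foldA_sublist ak ordered []
  have hndA : selA.Nodup := hnd.sublist hsub
  have hpwA : selA.Pairwise (fun a b => key a < key b) := hpw.sublist hsub
  rw [PySem.Set.ofList_eq_self_of_nodup selA hndA]
  exact PySem.List.sorted_eq_of_perm_of_pairwise_lt selA selA key (List.Perm.refl _) hpwA
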